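-- pv_equiv track=rewrite | github.com/vshubenkov/Grochaem_algoritms | Chapter_3_1.py | box_creation
-- ===== SOURCE A (Python) =====
-- def box_creation(box_count):
--     box = []
--     main_box = [box]
--     while box_count > 0:
--         if not main_box[0]:
--             main_box[0].append('level 1')
--         else:
--             pass
--         box_count -= 1
--     return main_box
-- ===== SOURCE B (Python) =====
-- def box_creation(box_count):
--     return [['level 1']] if box_count > 0 else [[]]
-- ===== Notes on version B (the rewrite author's own statement) =====
-- stated objective: simpler
-- what changed: Replaces the box_count-iteration while loop (which only ever appends on its first pass) with a single conditional closed-form expression.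
import Mathlib
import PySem

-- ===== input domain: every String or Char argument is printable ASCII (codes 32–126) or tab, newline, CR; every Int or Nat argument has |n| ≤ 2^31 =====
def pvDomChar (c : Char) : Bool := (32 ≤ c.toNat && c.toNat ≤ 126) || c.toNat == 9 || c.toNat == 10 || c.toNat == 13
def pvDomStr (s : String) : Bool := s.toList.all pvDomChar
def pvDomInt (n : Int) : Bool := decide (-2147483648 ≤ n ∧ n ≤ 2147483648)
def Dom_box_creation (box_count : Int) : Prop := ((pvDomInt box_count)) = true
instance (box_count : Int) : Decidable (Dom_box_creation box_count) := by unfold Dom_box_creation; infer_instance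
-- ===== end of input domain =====

-- B replaces A's box_count-iteration while loop (which only appends on its first pass) with a single conditional expression: simpler closed form.


-- ===== PORT A =====
-- while loop of A: runs while box_count > 0, appending 'level 1' to the inner box only when it is empty
def box_creation_loop (box_count : Int) (main_box : List (List String)) : List (List String) :=
  if h : box_count > 0 then
    box_creation_loop (box_count - 1)
      (if (main_box.headD []).isEmpty then [(main_box.headD []) ++ ["level 1"]] else main_box)
  else main_box
termination_by box_count.toNat
decreasing_by omega

def box_creation (box_count : Int) : List (List String) :=
  box_creation_loop box_count [[]]

-- ===== PORT B =====
def box_creation_alt (box_count : Int) : List (List String) :=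
  if box_count > 0 then [["level 1"]] else [[]]

-- ===== PRECONDITION & SPEC =====
def Spec_box_creation (box_count : Int) (out : List (List String)) : Prop := out = box_creation_alt box_count
instance (box_count : Int) (out : List (List String)) : Decidable (Spec_box_creation box_count out) := by unfold Spec_box_creation; infer_instance

-- ===== CLAIM (what is proved, stated in full; the proofs are below) =====
def Claim_equal_box_creation : Prop := ∀ (box_count : Int), Dom_box_creation box_count → Spec_box_creation box_count (box_creation box_count)

-- ===== LEMMAS AND PROOFS =====

-- ===== VERDICT (by name: the statement is the Claim_ definition above) =====
theorem box_creation_loop_fixed_nat (k : Nat) :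
    ∀ n : Int, n ≤ k → box_creation_loop n [["level 1"]] = [["level 1"]] := by
  induction k with
  | zero =>
      intro n h
      rw [box_creation_loop]
      simp only [dif_neg (by omega : ¬ n > 0)]
  | succ k ih =>
      intro n h
      rw [box_creation_loop]
      by_cases hp : n > 0
      · simpa [hp] using ih (n - 1) (by omega)
      · simp [hp]

theorem box_creation_loop_fixed (box_count : Int) :
    box_creation_loop box_count [["level 1"]] = [["level 1"]] :=
  box_creation_loop_fixed_nat box_count.toNat box_count (Int.self_le_toNat box_count)

theorem box_creation_spec : Claim_equal_box_creation := by
  intro box_count _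
  unfold Spec_box_creation box_creation box_creation_alt
  rw [box_creation_loop]
  by_cases h : box_count > 0
  · simpa [h] using box_creation_loop_fixed (box_count - 1)
  · simp [h]
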